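-- pv_equiv track=rewrite | github.com/ALTA-DE1-ARIF-MARZUKI-21Mar1999/Basic-Programming-Part4 | problem2/main.py | draw_xyz
-- ===== SOURCE A (Python) =====
-- def draw_xyz(N):
--     pattern = ""
--     for i in range(N):
--         row = []
--         for j in range(N):
--             value = (i * N + j + 1)
--             if value % 3 == 0:
--                 row.append('X')
--             elif value % 2 != 0:
--                 row.append('Y')
--             else:
--                 row.append('Z')
--         pattern += " ".join(row)
--         pattern += " \n"
--
--     return pattern
-- ===== SOURCE B (Python) =====
-- def draw_xyz(N):
--     if N < 1:
--         return ""
--     # values 1,2,3,... classify periodically with period 6: Y Z X Z Y X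
--     flat = "YZXZYX" * (N * N // 6 + 1)
--     flat = flat[:N * N]
--     out = []
--     i = 0
--     while i < len(flat):
--         out.append(" ".join(flat[i:i + N]) + " \n")
--         i += N
--     return "".join(out)
-- ===== Notes on version B (the rewrite author's own statement) =====
-- stated objective: alternative
-- what changed: B exploits the period-6 pattern of the classification: instead of testing value%3/value%2 per cell, it tiles the fixed string 'YZXZYX' to length N*N and cuts it into rows with a consuming while-loop, returning empty for N<1.
import Mathlib
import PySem

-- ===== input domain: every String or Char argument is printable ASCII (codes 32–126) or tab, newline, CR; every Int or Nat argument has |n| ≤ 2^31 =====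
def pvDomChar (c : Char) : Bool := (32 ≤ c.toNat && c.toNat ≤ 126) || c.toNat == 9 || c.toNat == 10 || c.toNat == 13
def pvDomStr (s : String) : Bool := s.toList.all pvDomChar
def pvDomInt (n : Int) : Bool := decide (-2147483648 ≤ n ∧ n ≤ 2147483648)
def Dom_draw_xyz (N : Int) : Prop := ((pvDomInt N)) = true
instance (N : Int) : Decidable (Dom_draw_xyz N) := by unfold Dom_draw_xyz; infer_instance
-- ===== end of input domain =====

-- B replaces A's per-cell %3/%2 tests by tiling the period-6 pattern "YZXZYX" to length N*N
-- and cutting it into rows with a consuming loop (objective: alternative algorithm, same cost).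

-- ===== PORT A =====
def draw_xyz (N : Int) : String :=
  String.mk ((PySem.List.pyRange 0 N 1).foldl (fun pattern i =>
    let row := (PySem.List.pyRange 0 N 1).foldl (fun row j =>
      let value := i * N + j + 1
      if PySem.Int.mod value 3 = 0 then row ++ [['X']]
      else if PySem.Int.mod value 2 ≠ 0 then row ++ [['Y']]
      else row ++ [['Z']]) ([] : List (List Char))
    pattern ++ PySem.Chars.join [' '] row ++ [' ', '\n']) ([] : List Char))

-- ===== PORT B =====
-- the while-loop of Source B: i starts at 0; each iteration emits " ".join(flat[i:i+N]) + " \n"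
-- and advances i by N.  N >= 1 at the call site, so the slice flat[i:i+N] (nonneg bounds) is
-- (flat.drop i).take N; the n = 0 branch is a totality guard only (never reached: the caller
-- checks N < 1 first).
def rowsB (n : Nat) (flat : List Char) (i : Nat) : List (List Char) :=
  if _h : i < flat.length then
    match n with
    | 0 => []
    | m+1 =>
      (PySem.Chars.join [' '] (((flat.drop i).take (m+1)).map (fun c => [c])) ++ [' ', '\n'])
        :: rowsB (m+1) flat (i + (m+1))
  else []
  termination_by flat.length - i
  decreasing_by omega

def draw_xyz_alt (N : Int) : String :=
  if N < 1 then ""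
  else
    -- "YZXZYX" * (N*N//6 + 1), then [:N*N]
    let flat := PySem.List.slice
      ((List.replicate (PySem.Int.floordiv (N * N) 6 + 1).toNat
        (['Y','Z','X','Z','Y','X'] : List Char)).flatten) none (some (N * N))
    String.mk (rowsB N.toNat flat 0).flatten

-- ===== PRECONDITION & SPEC =====
def Spec_draw_xyz (N : Int) (out : String) : Prop := out = draw_xyz_alt N
instance (N : Int) (out : String) : Decidable (Spec_draw_xyz N out) := by unfold Spec_draw_xyz; infer_instance

-- ===== CLAIM (what is proved, stated in full; the proofs are below) =====
def Claim_equal_draw_xyz : Prop := ∀ (N : Int), Dom_draw_xyz N → Spec_draw_xyz N (draw_xyz N)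

-- ===== LEMMAS AND PROOFS =====

-- the consuming-loop reformulation of B's while-loop (proof-side helper)
def rowsBspec : Nat → List Char → List (List Char)
  | _, [] => []
  | 0, s => [PySem.Chars.join [' '] (s.map (fun c => [c])) ++ [' ', '\n']]
  | n+1, c :: s =>
      (PySem.Chars.join [' '] (((c :: s).take (n+1)).map (fun c => [c])) ++ [' ', '\n'])
        :: rowsBspec (n+1) ((c :: s).drop (n+1))
  termination_by _ s => s.length
  decreasing_by simp


-- A's per-cell classification as a function (proof-side helper).
def cellOf (v : Int) : Char :=
  if PySem.Int.mod v 3 = 0 then 'X'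
  else if PySem.Int.mod v 2 ≠ 0 then 'Y'
  else 'Z'

-- A's inner loop builds the list of one-character cell strings of row i.
theorem innerA_eq (N i : Int) :
    (PySem.List.pyRange 0 N 1).foldl (fun row j =>
      let value := i * N + j + 1
      if PySem.Int.mod value 3 = 0 then row ++ [['X']]
      else if PySem.Int.mod value 2 ≠ 0 then row ++ [['Y']]
      else row ++ [['Z']]) ([] : List (List Char))
    = (PySem.List.pyRange 0 N 1).map (fun j => [cellOf (i * N + j + 1)]) := by
  have hstep : (fun (row : List (List Char)) (j : Int) =>
      let value := i * N + j + 1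
      if PySem.Int.mod value 3 = 0 then row ++ [['X']]
      else if PySem.Int.mod value 2 ≠ 0 then row ++ [['Y']]
      else row ++ [['Z']])
      = fun row j => row ++ [[cellOf (i * N + j + 1)]] := by
    funext row j
    simp only [cellOf]
    split_ifs <;> rfl
  rw [hstep, PySem.List.foldl_append_singleton_eq_map]
  simp

-- the classification of the values 1,2,3,… is periodic with period 6: Y Z X Z Y X
theorem cell_periodic (k : Nat) :
    (['Y','Z','X','Z','Y','X'] : List Char)[k % 6]? = some (cellOf ((k : Int) + 1)) := by
  obtain ⟨q, r, hr, rfl⟩ : ∃ q r, r < 6 ∧ k = 6 * q + r :=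
    ⟨k / 6, k % 6, Nat.mod_lt _ (by norm_num), (Nat.div_add_mod k 6).symm⟩
  have hmod : (6 * q + r) % 6 = r := by omega
  rw [hmod]
  interval_cases r <;>
    simp only [cellOf, PySem.Int.mod_eq_emod_of_pos (show (0:Int) < 3 by norm_num),
      PySem.Int.mod_eq_emod_of_pos (show (0:Int) < 2 by norm_num)] <;>
    split_ifs <;> first | rfl | (exfalso; omega)

-- indexing into the tiled pattern is indexing mod 6 into the pattern
theorem flat0_get (K : Nat) : ∀ k : Nat, k < K * 6 →
    ((List.replicate K (['Y','Z','X','Z','Y','X'] : List Char)).flatten)[k]?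
      = (['Y','Z','X','Z','Y','X'] : List Char)[k % 6]? := by
  induction K with
  | zero => intro k hk; omega
  | succ K ih =>
    intro k hk
    rw [List.replicate_succ, List.flatten_cons]
    by_cases h6 : k < 6
    · rw [List.getElem?_append_left h6, Nat.mod_eq_of_lt h6]
    · have hge : 6 ≤ k := by omega
      rw [List.getElem?_append_right (by simpa using hge)]
      have : (k - 6) % 6 = k % 6 := by omega
      simp only [List.length_cons, List.length_nil]
      rw [ih (k - 6) (by omega), this]

-- the flat tiled-and-truncated cell list is the classification of 1..n*n
theorem flat_eq (n : Nat) (hn : 0 < n) :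
    PySem.List.slice
      ((List.replicate (PySem.Int.floordiv ((n : Int) * n) 6 + 1).toNat
        (['Y','Z','X','Z','Y','X'] : List Char)).flatten) none (some ((n : Int) * n))
    = (List.range' 0 (n * n)).map (fun (k : Nat) => cellOf ((k : Int) + 1)) := by
  have hnn : (0 : Int) ≤ (n : Int) * n := by positivity
  rw [PySem.List.slice_to _ hnn]
  have htn : ((n : Int) * n).toNat = n * n := by omega
  rw [htn]
  have hK : n * n ≤ (PySem.Int.floordiv ((n : Int) * n) 6 + 1).toNat * 6 := by
    rw [PySem.Int.floordiv_eq_ediv_of_pos (by norm_num)]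
    omega
  have hlen : ((List.replicate (PySem.Int.floordiv ((n : Int) * n) 6 + 1).toNat
      (['Y','Z','X','Z','Y','X'] : List Char)).flatten).length
      = (PySem.Int.floordiv ((n : Int) * n) 6 + 1).toNat * 6 := by
    simp [List.length_flatten, List.map_replicate]
  apply List.ext_getElem
  · simp
    omega
  · intro k h1 h2
    have hk : k < n * n := by
      simpa using h2
    have hkf : k < ((List.replicate (PySem.Int.floordiv ((n : Int) * n) 6 + 1).toNat
        (['Y','Z','X','Z','Y','X'] : List Char)).flatten).length := by omega
    have h0 := List.getElem?_eq_getElem hkf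
    rw [flat0_get _ k (by omega), cell_periodic k] at h0
    have hflat : ((List.replicate (PySem.Int.floordiv ((n : Int) * n) 6 + 1).toNat
        (['Y','Z','X','Z','Y','X'] : List Char)).flatten)[k]'hkf = cellOf ((k : Int) + 1) :=
      (Option.some.inj h0).symm
    rw [List.getElem_take, hflat, List.getElem_map, List.getElem_range']
    simp

-- equation lemma for the while-loop: one iteration peels off one row
theorem rowsBspec_cons (n : Nat) (hn : 0 < n) (s : List Char) (hs : s ≠ []) :
    rowsBspec n s = (PySem.Chars.join [' '] ((s.take n).map (fun c => [c])) ++ [' ', '\n'])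
        :: rowsBspec n (s.drop n) := by
  match n, s with
  | 0, _ => omega
  | n+1, [] => exact absurd rfl hs
  | n+1, c :: s => rw [rowsBspec]

-- the while-loop over a flat list of m rows of n cells produces the m row strings
theorem rowsBspec_map_range' (n : Nat) (hn : 0 < n) : ∀ (m a : Nat) (f : Nat → Char),
    rowsBspec n ((List.range' a (m * n)).map f)
    = (List.range m).map (fun r =>
        PySem.Chars.join [' '] (((List.range' (a + r * n) n).map f).map (fun c => [c]))
          ++ [' ', '\n']) := by
  intro m
  induction m with
  | zero => intro a f; simp [rowsBspec]
  | succ m ih =>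
    intro a f
    have hsplit : List.range' a ((m + 1) * n) = List.range' a n ++ List.range' (a + n) (m * n) := by
      have h : (m + 1) * n = n + m * n := by ring
      rw [h, ← List.range'_append_1]
    have hne : ((List.range' a ((m + 1) * n)).map f) ≠ [] := by
      simp [List.range'_eq_nil_iff]
      omega
    rw [rowsBspec_cons n hn _ hne, hsplit, List.map_append]
    have hlen : ((List.range' a n).map f).length = n := by simp
    rw [List.take_append_of_le_length (by omega), List.drop_append_of_le_length (by omega)]
    rw [List.take_of_length_le (by omega), List.drop_of_length_le (by omega)]
    simp only [List.nil_append, ih (a + n) f]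
    rw [List.range_succ_eq_map]
    simp only [List.map_cons, List.map_map, Nat.zero_mul, Nat.add_zero]
    congr 1
    apply List.map_congr_left
    intro r _
    have : a + n + r * n = a + (r + 1) * n := by ring
    simp [Function.comp, this]


-- B's index-based while-loop equals the consuming loop on the dropped suffix
theorem rowsB_eq_spec (n : Nat) (hn : 0 < n) :
    ∀ (k : Nat) (flat : List Char) (i : Nat), flat.length - i ≤ k →
      rowsB n flat i = rowsBspec n (flat.drop i) := by
  intro k
  induction k with
  | zero =>
    intro flat i hk
    have hge : flat.length ≤ i := by omega
    rw [rowsB.eq_def]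
    simp [Nat.not_lt.mpr hge, List.drop_of_length_le hge, rowsBspec]
  | succ k ih =>
    intro flat i hk
    by_cases h : i < flat.length
    · obtain ⟨m, rfl⟩ : ∃ m, n = m + 1 := ⟨n - 1, by omega⟩
      have hne : flat.drop i ≠ [] := by
        intro hnil
        have := List.drop_eq_nil_iff.mp hnil
        omega
      rw [rowsB]
      simp only [h, dif_pos]
      rw [rowsBspec_cons (m + 1) (by omega) _ hne, List.drop_drop]
      exact congrArg _ (ih flat (i + (m + 1)) (by omega))
    · have hge : flat.length ≤ i := by omega
      rw [rowsB.eq_def]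
      simp [Nat.not_lt.mpr hge, List.drop_of_length_le hge, rowsBspec]

-- ===== VERDICT (by name: the statement is the Claim_ definition above) =====
theorem draw_xyz_spec : Claim_equal_draw_xyz := by
  intro N _
  unfold Spec_draw_xyz draw_xyz draw_xyz_alt
  by_cases hN : N < 1
  · rw [PySem.List.pyRange_one_eq_nil (by omega)]
    simp [hN]
    rfl
  · simp only [hN, if_neg, not_false_iff]
    have hfun : (fun (pattern : List Char) (i : Int) =>
        let row := (PySem.List.pyRange 0 N 1).foldl (fun row j =>
          let value := i * N + j + 1
          if PySem.Int.mod value 3 = 0 then row ++ [['X']]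
          else if PySem.Int.mod value 2 ≠ 0 then row ++ [['Y']]
          else row ++ [['Z']]) ([] : List (List Char))
        pattern ++ PySem.Chars.join [' '] row ++ [' ', '\n'])
        = fun pattern i => pattern ++
            (PySem.Chars.join [' ']
              ((PySem.List.pyRange 0 N 1).map (fun j => [cellOf (i * N + j + 1)]))
             ++ [' ', '\n']) := by
      funext pattern i
      simp only [innerA_eq, List.append_assoc]
    rw [hfun, PySem.List.foldl_append_eq_flatMap, List.nil_append]
    set n := N.toNat with hn
    have hNn : (n : Int) = N := by omega
    have hpos : 0 < n := by omega
    rw [← hNn]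
    rw [flat_eq n hpos]
    rw [rowsB_eq_spec n hpos _ _ 0 (le_refl _), List.drop_zero]
    rw [rowsBspec_map_range' n hpos (n) 0 (fun (k : Nat) => cellOf ((k : Int) + 1))]
    rw [List.flatMap_def]
    congr 1
    rw [PySem.List.pyRange_one]
    simp only [Int.sub_zero, Int.toNat_natCast, List.map_map]
    congr 1
    apply List.map_congr_left
    intro r hr
    simp only [Function.comp]
    congr 2
    rw [List.range'_eq_map_range]
    simp only [List.map_map]
    apply List.map_congr_left
    intro j hj
    simp only [Function.comp]
    congr 1
    push_cast
    ring_nf
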